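-- pv_equiv track=rewrite | github.com/Le-Gall-Valentin/Tetris_project | MutablesGridsMatrix.py | createTriangleGridMatrix
-- ===== SOURCE A (Python) =====
-- def createTriangleGridMatrix(long: int) -> list:
--     """
--     Crée une grille en forme de triangle de taille (long)
--     :param long: entier, C'est la taille en longueur et largeur de la grille
--     :return: liste, Renvoie une liste 2D représentant la grille triangle
--     """
--     gridMatrix = []
--     for i in range((long//2) + 1):
--         gridMatrix.append([1]*long)
--         for j in range((long//2) - i):
--             gridMatrix[i][-j-1] = 0
--             gridMatrix[i][j] = 0
--     return gridMatrix
-- ===== SOURCE B (Python) =====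
-- def createTriangleGridMatrix(long: int) -> list:
--     """
--     Crée une grille en forme de triangle de taille (long)
--     :param long: entier, C'est la taille en longueur et largeur de la grille
--     :return: liste, Renvoie une liste 2D représentant la grille triangle
--     """
--     half = long // 2
--     return [[0] * z + [1] * (long - 2 * z) + [0] * z for z in range(half, -1, -1)]
-- ===== Notes on version B (the rewrite author's own statement) =====
-- stated objective: simpler
-- what changed: Each row is built directly as [0]*z + [1]*(long-2*z) + [0]*z for z counting down, replacing A's fill-with-ones row plus an inner index-overwriting loop with negative indexing.
import Mathlib
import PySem

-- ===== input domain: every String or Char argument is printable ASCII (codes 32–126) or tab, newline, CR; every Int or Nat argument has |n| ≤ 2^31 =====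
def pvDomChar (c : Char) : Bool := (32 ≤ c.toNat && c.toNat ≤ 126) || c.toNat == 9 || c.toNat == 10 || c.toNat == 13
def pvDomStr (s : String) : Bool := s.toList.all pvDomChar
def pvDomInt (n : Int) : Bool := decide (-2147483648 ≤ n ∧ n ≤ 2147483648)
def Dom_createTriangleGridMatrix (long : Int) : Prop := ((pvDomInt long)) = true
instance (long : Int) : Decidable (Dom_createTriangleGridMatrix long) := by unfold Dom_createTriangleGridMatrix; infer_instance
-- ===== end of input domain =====

-- B builds each row directly as [0]*z ++ [1]*(long-2*z) ++ [0]*z (simpler decomposition);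
-- A fills each row with 1s and overwrites a prefix and a (negatively indexed) suffix in an inner loop.

-- ===== PORT A =====
-- Python's  xs[i] = v  on an array-modelled list (hand-ported: index rule exact via PySem.List.pyIdx?,
-- Python's negative-index semantics; the in-place mutation of A's rows is modelled by Array update)
def pyArraySet (a : Array Int) (i : Int) (v : Int) : Array Int :=
  match PySem.List.pyIdx? a.size i with
  | some k => a.setIfInBounds k v
  | none => a

-- Python's  gridMatrix[i][...] = 0 : fetch row i, mutate it, store it back (same pyIdx? index rule)
def pyRowModify (a : Array (Array Int)) (i : Int) (f : Array Int -> Array Int) : Array (Array Int) :=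
  match PySem.List.pyIdx? a.size i with
  | some k => a.modify k f
  | none => a

def createTriangleGridMatrix (long : Int) : List (List Int) :=
  ((PySem.List.pyRange 0 (PySem.Int.floordiv long 2 + 1)).foldl
    (fun gridMatrix i =>
      let gm := gridMatrix.push ((PySem.List.pyRepeat [(1 : Int)] long).toArray)
      (PySem.List.pyRange 0 (PySem.Int.floordiv long 2 - i)).foldl
        (fun gm j =>
          -- gridMatrix[i][-j-1] = 0
          let gm' := pyRowModify gm i (fun row => pyArraySet row (-j - 1) 0)
          -- gridMatrix[i][j] = 0
          pyRowModify gm' i (fun row => pyArraySet row j 0)) gm)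
    #[]).toList.map Array.toList

-- ===== PORT B =====
def createTriangleGridMatrix_alt (long : Int) : List (List Int) :=
  let half := PySem.Int.floordiv long 2
  (PySem.List.pyRange half (-1) (-1)).map (fun z =>
    PySem.List.pyRepeat [(0 : Int)] z
      ++ PySem.List.pyRepeat [(1 : Int)] (long - 2 * z)
      ++ PySem.List.pyRepeat [(0 : Int)] z)

-- ===== PRECONDITION & SPEC =====
def Spec_createTriangleGridMatrix (long : Int) (out : List (List Int)) : Prop := out = createTriangleGridMatrix_alt long
instance (long : Int) (out : List (List Int)) : Decidable (Spec_createTriangleGridMatrix long out) := by unfold Spec_createTriangleGridMatrix; infer_instance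

-- ===== CLAIM (what is proved, stated in full; the proofs are below) =====
def Claim_equal_createTriangleGridMatrix : Prop := ∀ (long : Int), Dom_createTriangleGridMatrix long → Spec_createTriangleGridMatrix long (createTriangleGridMatrix long)

-- ===== LEMMAS AND PROOFS =====

-- the triangle row with z zeros on each side of a band of ones, total length n
def rowP (n z : Nat) : List Int :=
  List.replicate z 0 ++ List.replicate (n - 2 * z) 1 ++ List.replicate z 0

theorem rowP_length (n z : Nat) (h : 2 * z ≤ n) : (rowP n z).length = n := by
  simp [rowP]; omega

-- Python's negative-index assignment: xs[i] = v for -len(xs) ≤ i < 0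
theorem pySetD_neg {α : Type} (xs : List α) (i : Int) (v : α)
    (h1 : i < 0) (h2 : -(xs.length : Int) ≤ i) :
    PySem.List.pySetD xs i v = xs.set (xs.length - (-i).toNat) v := by
  have h0 : ¬ (0 ≤ i) := not_le.mpr h1
  simp only [PySem.List.pySetD, PySem.List.pySet?, PySem.List.pyIdx?, if_neg h0, if_pos h2,
    Option.map_some, Option.getD_some]

-- one pass of A's inner loop body on the triangle row
theorem row_step (n j : Nat) (h : 2 * j + 2 ≤ n) :
    PySem.List.pySetD (PySem.List.pySetD (rowP n j) (-(j : Int) - 1) 0) (j : Int) 0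
      = rowP n (j + 1) := by
  have hlen : (rowP n j).length = n := rowP_length n j (by omega)
  have hset1 : PySem.List.pySetD (rowP n j) (-(j : Int) - 1) 0
      = (rowP n j).set (n - (j + 1)) 0 := by
    rw [pySetD_neg _ _ _ (by omega) (by rw [hlen]; omega)]
    rw [hlen]
    congr 1
    omega
  rw [hset1, PySem.List.pySetD_of_nonneg _ _ (by positivity), Int.toNat_natCast]
  have e0 : rowP n j
      = List.replicate j 0 ++ (List.replicate (n - 2*j - 1) 1 ++ ([1] ++ List.replicate j 0)) := by
    simp only [rowP, List.append_assoc]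
    congr 1
    rw [← List.append_assoc, ← List.replicate_succ']
    congr 2
    omega
  rw [e0]
  rw [List.set_append_right _ _ (by simp only [List.length_replicate]; omega)]
  rw [List.set_append_right _ _ (by simp only [List.length_replicate]; omega)]
  simp only [List.length_replicate]
  have e4 : j - j = 0 := by omega
  have e1' : n - (j + 1) - j = n - 2*j - 1 := by omega
  rw [e4, e1']
  rw [List.set_append_right _ _ (by simp only [List.length_replicate]; omega)]
  simp only [List.length_replicate, Nat.sub_self]
  have e2 : (([1] ++ List.replicate j 0) : List Int).set 0 0 = [0] ++ List.replicate j 0 := rfl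
  rw [e2]
  rw [List.set_append_left _ _ (by simp only [List.length_replicate]; omega)]
  have e5 : (List.replicate (n - 2*j - 1) (1:Int)) = 1 :: List.replicate (n - 2*j - 2) 1 := by
    rw [← List.replicate_succ]
    congr 1
    omega
  rw [e5, List.set_cons_zero]
  have ecnt : n - 2 * (j + 1) = n - 2*j - 2 := by omega
  simp [rowP, ecnt, List.replicate_succ', List.append_assoc]
  rw [← List.replicate_succ, List.replicate_succ']

-- A's inner loop, run alone on one row
theorem row_fold (n z : Nat) (h : 2 * z ≤ n) :
    ((List.range z).map (fun k : Nat => (k : Int))).foldl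
        (fun r j => PySem.List.pySetD (PySem.List.pySetD r (-j - 1) 0) j 0)
        (List.replicate n 1)
      = rowP n z := by
  induction z with
  | zero => simp [rowP]
  | succ t ih =>
      rw [List.range_succ, List.map_append, List.foldl_append, ih (by omega)]
      simp only [List.map_cons, List.map_nil, List.foldl_cons, List.foldl_nil]
      exact row_step n t (by omega)

-- bridges between the array-modelled mutation and PySem's list-level assignment
theorem pyArraySet_toList (a : Array Int) (i : Int) (v : Int) :
    (pyArraySet a i v).toList = PySem.List.pySetD a.toList i v := by
  unfold pyArraySet
  rw [show a.size = a.toList.length from Array.length_toList.symm]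
  simp only [PySem.List.pySetD, PySem.List.pySet?]
  cases h : PySem.List.pyIdx? a.toList.length i
  · simp
  · simp [Array.toList_setIfInBounds]

theorem pyRowModify_push (acc : Array (Array Int)) (r : Array Int) (f : Array Int -> Array Int) :
    pyRowModify (acc.push r) (acc.size : Int) f = acc.push (f r) := by
  unfold pyRowModify
  have hidx : PySem.List.pyIdx? (acc.push r).size (acc.size : Int) = some acc.size := by
    simp only [PySem.List.pyIdx?, Array.size_push]
    rw [if_pos (by positivity), if_pos (by exact_mod_cast Nat.lt_succ_self acc.size)]
    simp
  rw [hidx]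
  apply Array.toList_inj.mp
  rw [Array.toList_modify, Array.toList_push, Array.toList_push]
  rw [List.modify_eq_set]
  rw [List.set_append_right _ _ (by simp)]
  simp

-- A's inner loop on one row, at the array level vs the list level
theorem rowArr_fold_toList (js : List Int) (r : Array Int) :
    (js.foldl (fun row j => pyArraySet (pyArraySet row (-j - 1) 0) j 0) r).toList
      = js.foldl (fun r j => PySem.List.pySetD (PySem.List.pySetD r (-j - 1) 0) j 0) r.toList := by
  induction js generalizing r with
  | nil => rfl
  | cons j js ih =>
      simp only [List.foldl_cons]
      rw [ih, pyArraySet_toList, pyArraySet_toList]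

-- lifting: A's inner loop only ever touches the last (just pushed) row of the accumulator
theorem arr_inner (js : List Int) (acc : Array (Array Int)) (r : Array Int) (i : Int)
    (hi : i = (acc.size : Int)) :
    js.foldl (fun gm j =>
        let gm' := pyRowModify gm i (fun row => pyArraySet row (-j - 1) 0)
        pyRowModify gm' i (fun row => pyArraySet row j 0)) (acc.push r)
      = acc.push (js.foldl (fun row j => pyArraySet (pyArraySet row (-j - 1) 0) j 0) r) := by
  subst hi
  induction js generalizing r with
  | nil => rfl
  | cons j js ih =>
      simp only [List.foldl_cons, pyRowModify_push]
      exact ih _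

-- A's outer loop builds exactly the rows rowP n (n/2 - k)
theorem outer_fold (n : Nat) (t : Nat) (ht : t <= n / 2 + 1) :
    ((List.range t).map (fun k : Nat => (k : Int))).foldl
        (fun gridMatrix i =>
          let gm := gridMatrix.push ((PySem.List.pyRepeat [(1 : Int)] (n : Int)).toArray)
          (PySem.List.pyRange 0 (PySem.Int.floordiv (n : Int) 2 - i)).foldl
            (fun gm j =>
              let gm' := pyRowModify gm i (fun row => pyArraySet row (-j - 1) 0)
              pyRowModify gm' i (fun row => pyArraySet row j 0)) gm)
        #[]
      = ((List.range t).map (fun k => (rowP n (n / 2 - k)).toArray)).toArray := by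
  induction t with
  | zero => rfl
  | succ t ih =>
      rw [List.range_succ, List.map_append, List.foldl_append, ih (by omega)]
      simp only [List.map_cons, List.map_nil, List.foldl_cons, List.foldl_nil, List.map_append]
      have hfd : PySem.Int.floordiv (n : Int) 2 = ((n / 2 : Nat) : Int) := by
        exact_mod_cast PySem.Int.floordiv_natCast n 2
      have hz : PySem.Int.floordiv (n : Int) 2 - (t : Int) = ((n / 2 - t : Nat) : Int) := by
        rw [hfd]; omega
      rw [hz, PySem.List.pyRange_zero_natCast]
      have hsz : (t : Int)
          = ((((List.range t).map (fun k => (rowP n (n / 2 - k)).toArray)).toArray).size : Int) := by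
        simp [List.size_toArray]
      rw [hsz]
      rw [arr_inner _ _ _ _ rfl]
      rw [List.push_toArray]
      apply Array.toList_inj.mp
      refine (List.append_right_inj _).mpr ?_
      simp only [List.cons.injEq, and_true]
      apply Array.toList_inj.mp
      rw [rowArr_fold_toList, List.toList_toArray, List.toList_toArray,
          PySem.List.pyRepeat_singleton, Int.toNat_natCast]
      exact row_fold n (n / 2 - t) (by omega)

-- B's countdown range
theorem pyRange_down (h : Nat) :
    PySem.List.pyRange (h : Int) (-1) (-1)
      = (List.range (h + 1)).map (fun k : Nat => (h : Int) - (k : Int)) := by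
  simp only [PySem.List.pyRange]
  rw [if_neg (show ¬ (-1 : Int) = 0 by omega)]
  rw [if_neg (show ¬ (0 : Int) < -1 by omega), if_pos (show (-1 : Int) < (h : Int) by omega)]
  have hc : (((h : Int) - -1 + - -1 - 1) / - -1).toNat = h + 1 := by
    have e : ((h : Int) - -1 + - -1 - 1) = (h : Int) + 1 := by ring
    have e2 : (- - 1 : Int) = 1 := by norm_num
    rw [e, e2, Int.ediv_one]
    omega
  rw [hc]
  refine List.map_congr_left (fun k _ => ?_)
  omega

-- the two ports agree for nonnegative long
theorem agree_nonneg (n : Nat) :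
    createTriangleGridMatrix (n : Int) = createTriangleGridMatrix_alt (n : Int) := by
  have hfd : PySem.Int.floordiv (n : Int) 2 = ((n / 2 : Nat) : Int) := by
    exact_mod_cast PySem.Int.floordiv_natCast n 2
  -- A side
  have hA : createTriangleGridMatrix (n : Int)
      = (List.range (n / 2 + 1)).map (fun k => rowP n (n / 2 - k)) := by
    unfold createTriangleGridMatrix
    have h1 : PySem.Int.floordiv (n : Int) 2 + 1 = ((n / 2 + 1 : Nat) : Int) := by
      rw [hfd]; push_cast; ring
    rw [h1, PySem.List.pyRange_zero_natCast, outer_fold n (n / 2 + 1) le_rfl]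
    simp [List.map_map, Function.comp]
  -- B side
  have hB : createTriangleGridMatrix_alt (n : Int)
      = (List.range (n / 2 + 1)).map (fun k => rowP n (n / 2 - k)) := by
    unfold createTriangleGridMatrix_alt
    simp only [hfd, pyRange_down, List.map_map]
    refine List.map_congr_left (fun k hk => ?_)
    have hk' : k ≤ n / 2 := by
      have := List.mem_range.mp hk; omega
    have hzc : ((n / 2 : Nat) : Int) - (k : Int) = ((n / 2 - k : Nat) : Int) := by omega
    simp only [Function.comp_apply, hzc, PySem.List.pyRepeat_singleton, rowP]
    have h1 : (((n / 2 - k : Nat) : Int)).toNat = n / 2 - k := Int.toNat_natCast _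
    have h2 : ((n : Int) - 2 * ((n / 2 - k : Nat) : Int)).toNat = n - 2 * (n / 2 - k) := by omega
    rw [h1, h2]
  rw [hA, hB]

-- both ports return [] for negative long
theorem agree_neg (long : Int) (h : long < 0) :
    createTriangleGridMatrix long = createTriangleGridMatrix_alt long := by
  have hfd : PySem.Int.floordiv long 2 ≤ -1 := by
    rw [PySem.Int.floordiv_eq_ediv_of_pos (by omega)]; omega
  have hA : createTriangleGridMatrix long = [] := by
    unfold createTriangleGridMatrix
    have hpr : PySem.List.pyRange 0 (PySem.Int.floordiv long 2 + 1) = [] := by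
      simp only [PySem.List.pyRange]
      rw [if_neg (by omega), if_pos (by omega), if_neg (by omega)]
      simp
    rw [hpr]
    rfl
  have hB : createTriangleGridMatrix_alt long = [] := by
    have hpr : PySem.List.pyRange (PySem.Int.floordiv long 2) (-1) (-1) = [] := by
      simp only [PySem.List.pyRange]
      rw [if_neg (by omega), if_neg (by omega), if_neg (by omega)]
      simp
    unfold createTriangleGridMatrix_alt
    simp only [hpr, List.map_nil]
  rw [hA, hB]

-- ===== VERDICT (by name: the statement is the Claim_ definition above) =====
theorem createTriangleGridMatrix_spec : Claim_equal_createTriangleGridMatrix := by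
  intro long _
  unfold Spec_createTriangleGridMatrix
  by_cases h : 0 ≤ long
  · obtain ⟨n, rfl⟩ := Int.eq_ofNat_of_zero_le h
    exact agree_nonneg n
  · exact agree_neg long (by omega)
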